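-- pv_equiv track=rewrite | github.com/deniska/adventofcode | advent2024/a21.py | iternumpad
-- ===== SOURCE A (Python) =====
-- coords_numpad = {
--     '7': (0, 0), '8': (1, 0), '9': (2, 0),
--     '4': (0, 1), '5': (1, 1), '6': (2, 1),
--     '1': (0, 2), '2': (1, 2), '3': (2, 2),
--                  '0': (1, 3), 'A': (2, 3),
-- }
--
-- def lr(dx):
--     if dx >= 0:
--         return '>' * dx
--     else:
--         return '<' * (-dx)
--
-- def ud(dy):
--     if dy >= 0:
--         return 'v' * dy
--     else:
--         return '^' * (-dy)
--
-- def iternumpad(code):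
--     results = [[]]
--     prev = 'A'
--     for c in code:
--         px, py = coords_numpad[prev]
--         cx, cy = coords_numpad[c]
--         dx = cx - px
--         dy = cy - py
--         hor = lr(dx)
--         ver = ud(dy)
--         if prev in '0A' and c in '147':
--             # must go up first
--             for r in results:
--                 r.extend(ver)
--                 r.extend(hor)
--         elif c in '0A' and prev in '147':
--             # must go down last
--             for r in results:
--                 r.extend(hor)
--                 r.extend(ver)
--         else:
--             if dx != 0 and dy != 0:
--                 new = [r.copy() for r in results]
--                 for r in new:
--                     r.extend(ver)
--                     r.extend(hor)
--             for r in results: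
--                 r.extend(hor)
--                 r.extend(ver)
--             if dx != 0 and dy != 0:
--                 results.extend(new)
--         for r in results:
--             r.append('A')
--         prev = c
--     return results
-- ===== SOURCE B (Python) =====
-- coords_numpad = {
--     '7': (0, 0), '8': (1, 0), '9': (2, 0),
--     '4': (0, 1), '5': (1, 1), '6': (2, 1),
--     '1': (0, 2), '2': (1, 2), '3': (2, 2),
--                  '0': (1, 3), 'A': (2, 3),
-- }
--
-- def iternumpad(code):
--     # Build one options table (list of candidate move-strings per character),
--     # then take the cartesian product with the later characters slowest-varying.
--     options = []
--     prev = 'A'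
--     for c in code:
--         px, py = coords_numpad[prev]
--         cx, cy = coords_numpad[c]
--         hor = ('>' if cx > px else '<') * abs(cx - px)
--         ver = ('v' if cy > py else '^') * abs(cy - py)
--         if prev in '0A' and c in '147':
--             opts = [ver + hor]            # must go up first
--         elif c in '0A' and prev in '147':
--             opts = [hor + ver]            # must go down last
--         elif hor and ver:
--             opts = [hor + ver, ver + hor]
--         else:
--             opts = [hor + ver]
--         options.append([list(o) + ['A'] for o in opts])
--         prev = c
--     paths = [[]]
--     for opts in options:
--         paths = [p + o for o in opts for p in paths]
--     return paths
-- ===== Notes on version B (the rewrite author's own statement) =====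
-- stated objective: alternative
-- what changed: B first builds one options table (the list of candidate move-strings per character) and then materialises all paths with a cartesian-product fold, instead of A's in-place doubling and mutation of the growing result lists.
import Mathlib
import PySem

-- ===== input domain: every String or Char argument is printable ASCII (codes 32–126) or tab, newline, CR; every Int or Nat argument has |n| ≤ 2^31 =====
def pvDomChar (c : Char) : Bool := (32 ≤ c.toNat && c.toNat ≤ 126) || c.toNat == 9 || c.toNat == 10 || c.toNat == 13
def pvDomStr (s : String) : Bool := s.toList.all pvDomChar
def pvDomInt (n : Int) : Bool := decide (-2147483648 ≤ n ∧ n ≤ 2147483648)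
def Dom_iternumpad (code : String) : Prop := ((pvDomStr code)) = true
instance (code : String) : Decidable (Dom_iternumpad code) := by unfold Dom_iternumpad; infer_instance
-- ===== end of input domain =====

-- B replaces A's in-place doubling/mutation of result lists by an options table per
-- character followed by a cartesian-product fold (objective: alternative, same cost).

-- ===== PORT A =====
-- the module-level dict coords_numpad, as a pure lookup (Pre_ guarantees the key is present)
def coordsNumpad (c : Char) : Int × Int :=
  if c = '7' then (0, 0) else if c = '8' then (1, 0) else if c = '9' then (2, 0)
  else if c = '4' then (0, 1) else if c = '5' then (1, 1) else if c = '6' then (2, 1)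
  else if c = '1' then (0, 2) else if c = '2' then (1, 2) else if c = '3' then (2, 2)
  else if c = '0' then (1, 3) else (2, 3)

def lrA (dx : Int) : List Char :=
  if dx ≥ 0 then List.replicate dx.toNat '>' else List.replicate (-dx).toNat '<'

def udA (dy : Int) : List Char :=
  if dy ≥ 0 then List.replicate dy.toNat 'v' else List.replicate (-dy).toNat '^'

-- r.extend(s) appends s's characters as one-character strings
def pvStrs (l : List Char) : List String := l.map (fun ch => String.mk [ch])

def stepA (st : List (List String) × Char) (c : Char) : List (List String) × Char :=
  let results := st.1
  let prev := st.2
  let p := coordsNumpad prev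
  let q := coordsNumpad c
  let dx := q.1 - p.1
  let dy := q.2 - p.2
  let hor := lrA dx
  let ver := udA dy
  let results' :=
    if (prev = '0' ∨ prev = 'A') ∧ (c = '1' ∨ c = '4' ∨ c = '7') then
      -- must go up first
      results.map (fun r => r ++ pvStrs ver ++ pvStrs hor)
    else if (c = '0' ∨ c = 'A') ∧ (prev = '1' ∨ prev = '4' ∨ prev = '7') then
      -- must go down last
      results.map (fun r => r ++ pvStrs hor ++ pvStrs ver)
    else if dx ≠ 0 ∧ dy ≠ 0 then
      -- originals get hor+ver, the copied 'new' lists get ver+hor and are appended after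
      results.map (fun r => r ++ pvStrs hor ++ pvStrs ver)
        ++ results.map (fun r => r ++ pvStrs ver ++ pvStrs hor)
    else
      results.map (fun r => r ++ pvStrs hor ++ pvStrs ver)
  (results'.map (fun r => r ++ ["A"]), c)

def iternumpad (code : String) : List (List String) :=
  (code.toList.foldl stepA ([[]], 'A')).1

-- ===== PORT B =====
def optsFor (prev c : Char) : List (List String) :=
  let p := coordsNumpad prev
  let q := coordsNumpad c
  let hor := List.replicate (q.1 - p.1).natAbs (if q.1 > p.1 then '>' else '<')
  let ver := List.replicate (q.2 - p.2).natAbs (if q.2 > p.2 then 'v' else '^')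
  let opts : List (List Char) :=
    if (prev = '0' ∨ prev = 'A') ∧ (c = '1' ∨ c = '4' ∨ c = '7') then [ver ++ hor]
    else if (c = '0' ∨ c = 'A') ∧ (prev = '1' ∨ prev = '4' ∨ prev = '7') then [hor ++ ver]
    else if hor ≠ [] ∧ ver ≠ [] then [hor ++ ver, ver ++ hor]
    else [hor ++ ver]
  opts.map (fun o => o.map (fun ch => String.mk [ch]) ++ ["A"])

def iternumpad_alt (code : String) : List (List String) :=
  let options := (code.toList.foldl
      (fun (st : List (List (List String)) × Char) c => (st.1 ++ [optsFor st.2 c], c))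
      ([], 'A')).1
  options.foldl (fun paths opts => opts.flatMap (fun o => paths.map (fun pth => pth ++ o))) [[]]

-- ===== PRECONDITION & SPEC =====
-- Pre_ excludes exactly the codes containing a character outside the numpad,
-- on which Python A raises KeyError (B raises there too).
def Pre_iternumpad (code : String) : Prop :=
  code.toList.all (fun c => ('0' ≤ c && c ≤ '9') || c == 'A') = true
instance (code : String) : Decidable (Pre_iternumpad code) := by unfold Pre_iternumpad; infer_instance
def pvWitness_iternumpad : String := "029A"

def Spec_iternumpad (code : String) (out : List (List String)) : Prop := out = iternumpad_alt code
instance (code : String) (out : List (List String)) : Decidable (Spec_iternumpad code out) := by unfold Spec_iternumpad; infer_instance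

-- ===== CLAIM (what is proved, stated in full; the proofs are below) =====
def Claim_equal_iternumpad : Prop := ∀ (code : String), Dom_iternumpad code → Pre_iternumpad code → Spec_iternumpad code (iternumpad code)

-- ===== LEMMAS AND PROOFS =====

def pvCombine (paths : List (List String)) (opts : List (List String)) : List (List String) :=
  opts.flatMap (fun o => paths.map (fun pth => pth ++ o))

def pvOptsSeq : Char → List Char → List (List (List String))
  | _, [] => []
  | prev, c :: cs => optsFor prev c :: pvOptsSeq c cs

theorem lrA_eq (a b : Int) :
    lrA (a - b) = List.replicate (a - b).natAbs (if a > b then '>' else '<') := by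
  unfold lrA
  rcases lt_trichotomy a b with h | h | h
  · rw [if_neg (by omega), if_neg (by omega)]; congr 1; omega
  · subst h; simp
  · rw [if_pos (by omega), if_pos (by omega)]; congr 1; omega

theorem udA_eq (a b : Int) :
    udA (a - b) = List.replicate (a - b).natAbs (if a > b then 'v' else '^') := by
  unfold udA
  rcases lt_trichotomy a b with h | h | h
  · rw [if_neg (by omega), if_neg (by omega)]; congr 1; omega
  · subst h; simp
  · rw [if_pos (by omega), if_pos (by omega)]; congr 1; omega

theorem stepA_eq (st : List (List String) × Char) (c : Char) :
    stepA st c = (pvCombine st.1 (optsFor st.2 c), c) := by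
  unfold stepA optsFor pvCombine
  dsimp only
  rw [lrA_eq, udA_eq]
  set hor := List.replicate ((coordsNumpad c).1 - (coordsNumpad st.2).1).natAbs
      (if (coordsNumpad c).1 > (coordsNumpad st.2).1 then '>' else '<') with hh
  set ver := List.replicate ((coordsNumpad c).2 - (coordsNumpad st.2).2).natAbs
      (if (coordsNumpad c).2 > (coordsNumpad st.2).2 then 'v' else '^') with hv
  have hhor : ((coordsNumpad c).1 - (coordsNumpad st.2).1 ≠ 0) ↔ hor ≠ [] := by
    rw [hh]; simp [List.replicate_eq_nil_iff]
  have hver : ((coordsNumpad c).2 - (coordsNumpad st.2).2 ≠ 0) ↔ ver ≠ [] := by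
    rw [hv]; simp [List.replicate_eq_nil_iff]
  split_ifs <;>
    simp_all [pvStrs, List.map_map, Function.comp_def, List.map_append, List.append_assoc]

theorem foldA_eq (cs : List Char) (results : List (List String)) (prev : Char) :
    (cs.foldl stepA (results, prev)).1 = (pvOptsSeq prev cs).foldl pvCombine results := by
  induction cs generalizing results prev with
  | nil => rfl
  | cons c cs ih =>
      simp only [List.foldl_cons, pvOptsSeq]
      rw [stepA_eq]
      exact ih _ _

theorem buildB_eq (cs : List Char) (acc : List (List (List String))) (prev : Char) :
    (cs.foldl (fun (st : List (List (List String)) × Char) c => (st.1 ++ [optsFor st.2 c], c))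
        (acc, prev)).1 = acc ++ pvOptsSeq prev cs := by
  induction cs generalizing acc prev with
  | nil => simp [pvOptsSeq]
  | cons c cs ih =>
      simp only [List.foldl_cons, pvOptsSeq]
      rw [ih]
      simp

-- ===== VERDICT (by name: the statement is the Claim_ definition above) =====
theorem iternumpad_spec : Claim_equal_iternumpad := by
  intro code _ _
  unfold Spec_iternumpad iternumpad iternumpad_alt
  rw [foldA_eq, buildB_eq]
  rfl
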